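-- pv_equiv track=rewrite | github.com/johBac97/mirex2025-musecoco | utils_midi/remi_utils_bak.py | split_condition_seq_segment
-- ===== SOURCE A (Python) =====
-- from typing import List, Tuple, Dict
--
-- def get_bar_idx_from_remi(remi_seq):
--     # Get the starting token of each bar
--     start_token_index_of_the_bar = 0
--     bar_id = 0
--     bar_indices = {}
--
--     # bars_token_positions[bar_id] = (start token index of this bar, start token index of next bar)
--     for idx, token in enumerate(remi_seq):
--         if token == "b-1":
--             start_token_index_of_next_bar = idx + 1
--             bar_indices[bar_id] = (
--                 start_token_index_of_the_bar,
--                 start_token_index_of_next_bar,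
--             )
--
--             # Go to the next bar
--             start_token_index_of_the_bar = start_token_index_of_next_bar
--             bar_id = bar_id + 1
--     return bar_indices
--
-- def get_bar_idx_from_condition(condition_seq):
--     '''
--     Because in the condition, each bar is segmented also by the 'b-1' token,
--     Just call the get_bar_idx_from_remi function to do the work.
--     '''
--     ret = get_bar_idx_from_remi(condition_seq)
--     return ret
--
-- def split_condition_seq_segment(condition_seq: List[str]) -> List[Dict[str, List[str]]]:
--     """Convert the format of the input condition sequence from list to a list of dict.
--
--     Args:
--         condition_seq (List[str]): The condition sequence of a 2-bar segment
--
--     Returns: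
--         List[Dict[str, List[str]]]: The splitted condition seq. len(return) == num_bars. For each bar, the info is a dict, containing two keys: 'inst' and 'content'
--     """
--     ret = []
--     bar_indices = get_bar_idx_from_condition(condition_seq)
--     for bar_id in bar_indices:
--         bar_start_idx, bar_end_idx = bar_indices[bar_id]
--         bar_condition = condition_seq[bar_start_idx:bar_end_idx]
--         splitted_bar = split_condition_seq_bar(bar_condition)
--         ret.append(splitted_bar)
--     return ret
--
-- def split_condition_seq_bar(condition_seq: List[str]) -> Dict[str, List[str]]:
--     """Convert the remi of a bar to a dict containing different aspect of the info
--
--     Args: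
--         condition_seq (List[str]): remi of the bar
--
--     Returns:
--         Dict[str, List[str]]: splitted bar
--     """
--     ret = {}
--     pitch_seq_start_idx = condition_seq.index('PITCH')
--     inst_subseq = condition_seq[:pitch_seq_start_idx]
--     pitch_subseq = condition_seq[pitch_seq_start_idx:]
--     ret = {
--         'inst': inst_subseq,
--         'content': pitch_subseq,
--     }
--     return ret
-- ===== SOURCE B (Python) =====
-- from typing import List, Dict
--
-- def split_condition_seq_segment(condition_seq: List[str]) -> List[Dict[str, List[str]]]:
--     ret = []
--     buf = []
--     for tok in condition_seq:
--         buf.append(tok)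
--         if tok == 'b-1':
--             i = buf.index('PITCH')
--             ret.append({'inst': buf[:i], 'content': buf[i:]})
--             buf = []
--     return ret
-- ===== Notes on version B (the rewrite author's own statement) =====
-- stated objective: simpler
-- what changed: Replaces A's two-phase structure (build a bar-index dict by enumerating token positions, then look each bar id up again and re-slice the sequence) with a single left-to-right pass that accumulates the current bar in a buffer and emits its inst/content split at each 'b-1'.
import Mathlib
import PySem

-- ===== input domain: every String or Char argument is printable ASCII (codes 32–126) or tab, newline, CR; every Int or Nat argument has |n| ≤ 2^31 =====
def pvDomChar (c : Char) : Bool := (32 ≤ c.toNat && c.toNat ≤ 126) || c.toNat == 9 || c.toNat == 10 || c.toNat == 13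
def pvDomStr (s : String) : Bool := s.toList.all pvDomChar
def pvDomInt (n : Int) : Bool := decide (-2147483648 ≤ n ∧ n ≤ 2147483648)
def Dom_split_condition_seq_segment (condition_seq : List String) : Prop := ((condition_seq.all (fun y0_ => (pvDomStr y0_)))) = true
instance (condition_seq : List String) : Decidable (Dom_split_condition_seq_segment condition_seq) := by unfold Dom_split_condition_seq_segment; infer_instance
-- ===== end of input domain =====

-- B replaces A's two-phase structure (build a bar-index dict over enumerate, then re-slice the
-- sequence per key) by one direct pass that accumulates the current bar in a buffer (objective: simpler).

-- ===== PORT A =====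
-- helper: split_condition_seq_bar; Python raises ValueError when 'PITCH' is absent (index? = none,
-- excluded by Pre_); the port returns [] there.
def split_condition_seq_bar (condition_seq : List String) : List (String × List String) :=
  match PySem.List.index? condition_seq "PITCH" with
  | some i =>
      [("inst", PySem.List.slice condition_seq none (some (i : Int))),
       ("content", PySem.List.slice condition_seq (some (i : Int)) none)]
  | none => []

-- the loop body of get_bar_idx_from_remi; state = (start_token_index_of_the_bar, bar_id, bar_indices)
def barIdxStep (st : Int × Int × PySem.Dict Int (Int × Int)) (p : Int × String) :
    Int × Int × PySem.Dict Int (Int × Int) :=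
  if p.2 == "b-1" then (p.1 + 1, st.2.1 + 1, st.2.2.insert st.2.1 (st.1, p.1 + 1)) else st

def get_bar_idx_from_remi (remi_seq : List String) : PySem.Dict Int (Int × Int) :=
  ((PySem.List.enumerate remi_seq 0).foldl barIdxStep ((0 : Int), (0 : Int), PySem.Dict.empty)).2.2

def get_bar_idx_from_condition (condition_seq : List String) : PySem.Dict Int (Int × Int) :=
  get_bar_idx_from_remi condition_seq

def split_condition_seq_segment (condition_seq : List String) : List (List (String × List String)) :=
  let bar_indices := get_bar_idx_from_condition condition_seq
  bar_indices.keys.foldl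
    (fun ret bar_id =>
      ret ++ [split_condition_seq_bar (PySem.List.slice condition_seq
        (some (bar_indices.getD bar_id (0, 0)).1) (some (bar_indices.getD bar_id (0, 0)).2))])
    []

-- ===== PORT B =====
-- the loop body of B; state = (buf, ret); Python raises ValueError when a closed bar has no
-- 'PITCH' (index? = none, excluded by Pre_); the port appends [] there.
def altStep (st : List String × List (List (String × List String))) (tok : String) :
    List String × List (List (String × List String)) :=
  let buf := st.1 ++ [tok]
  if tok == "b-1" then
    match PySem.List.index? buf "PITCH" with
    | some i =>
        ([], st.2 ++ [[("inst", PySem.List.slice buf none (some (i : Int))),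
                       ("content", PySem.List.slice buf (some (i : Int)) none)]])
    | none => ([], st.2 ++ [[]])
  else (buf, st.2)

def split_condition_seq_segment_alt (condition_seq : List String) : List (List (String × List String)) :=
  (condition_seq.foldl altStep ([], [])).2

-- ===== PRECONDITION & SPEC =====
-- Pre_ excludes exactly the inputs on which Python A raises ValueError: sequences in which some
-- 'b-1'-terminated bar contains no 'PITCH' token (B raises the same ValueError there).
def Pre_split_condition_seq_segment (condition_seq : List String) : Prop :=
  ∀ c ∈ (condition_seq.splitOn "b-1").dropLast, "PITCH" ∈ c
instance (condition_seq : List String) : Decidable (Pre_split_condition_seq_segment condition_seq) := by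
  unfold Pre_split_condition_seq_segment; infer_instance

def pvWitness_split_condition_seq_segment : List String :=
  (["i-52", "PITCH", "o-3", "b-1", "i-52", "PITCH", "o-5", "b-1", "o-9"])

def Spec_split_condition_seq_segment (condition_seq : List String) (out : List (List (String × List String))) : Prop := out = split_condition_seq_segment_alt condition_seq
instance (condition_seq : List String) (out : List (List (String × List String))) : Decidable (Spec_split_condition_seq_segment condition_seq out) := by unfold Spec_split_condition_seq_segment; infer_instance

-- ===== CLAIM (what is proved, stated in full; the proofs are below) =====
def Claim_equal_split_condition_seq_segment : Prop := ∀ (condition_seq : List String), Dom_split_condition_seq_segment condition_seq → Pre_split_condition_seq_segment condition_seq → Spec_split_condition_seq_segment condition_seq (split_condition_seq_segment condition_seq)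

-- ===== LEMMAS AND PROOFS =====

-- the bars of a sequence: buf is the (open) prefix of the current bar; each emitted bar ends with "b-1";
-- tokens after the last "b-1" are dropped
def segsW (buf : List String) (xs : List String) : List (List String) :=
  match h : PySem.List.index? xs "b-1" with
  | some k => (buf ++ xs.take (k + 1)) :: segsW [] (xs.drop (k + 1))
  | none => []
termination_by xs.length
decreasing_by
  have hmem : "b-1" ∈ xs := by
    have hs := PySem.List.index?_isSome_iff (xs := xs) (v := "b-1")
    rw [h] at hs; simpa using hs
  cases xs with
  | nil => simp at hmem
  | cons a l => simp

lemma segsW_none (buf xs : List String) (h : PySem.List.index? xs "b-1" = none) :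
    segsW buf xs = [] := by
  rw [segsW]
  split
  · next k heq =>
    rw [PySem.List.index?_eq_idxOf?] at h heq; rw [h] at heq; cases heq
  · rfl

lemma segsW_some (buf xs : List String) (k : Nat) (h : PySem.List.index? xs "b-1" = some k) :
    segsW buf xs = (buf ++ xs.take (k + 1)) :: segsW [] (xs.drop (k + 1)) := by
  rw [segsW]
  split
  · next k' heq =>
    rw [PySem.List.index?_eq_idxOf?] at h heq; rw [h] at heq
    cases heq; rfl
  · next heq =>
    rw [PySem.List.index?_eq_idxOf?] at h heq; rw [h] at heq; cases heq

-- the items A's dict holds for the suffix xs starting at absolute position i, first fresh bar id b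
def itemsB (b : Int) (i : Nat) (xs : List String) : List (Int × Int × Int) :=
  match h : PySem.List.index? xs "b-1" with
  | some k => (b, ((i : Int), ((i + k + 1 : Nat) : Int))) :: itemsB (b + 1) (i + k + 1) (xs.drop (k + 1))
  | none => []
termination_by xs.length
decreasing_by
  have hmem : "b-1" ∈ xs := by
    have hs := PySem.List.index?_isSome_iff (xs := xs) (v := "b-1")
    rw [h] at hs; simpa using hs
  cases xs with
  | nil => simp at hmem
  | cons a l => simp

lemma itemsB_none (b : Int) (i : Nat) (xs : List String)
    (h : PySem.List.index? xs "b-1" = none) : itemsB b i xs = [] := by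
  rw [itemsB]
  split
  · next k heq =>
    rw [PySem.List.index?_eq_idxOf?] at h heq; rw [h] at heq; cases heq
  · rfl

lemma itemsB_some (b : Int) (i : Nat) (xs : List String) (k : Nat)
    (h : PySem.List.index? xs "b-1" = some k) :
    itemsB b i xs = (b, ((i : Int), ((i + k + 1 : Nat) : Int)))
      :: itemsB (b + 1) (i + k + 1) (xs.drop (k + 1)) := by
  rw [itemsB]
  split
  · next k' heq =>
    rw [PySem.List.index?_eq_idxOf?] at h heq; rw [h] at heq
    cases heq; rfl
  · next heq =>
    rw [PySem.List.index?_eq_idxOf?] at h heq; rw [h] at heq; cases heq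

lemma barIdx_skip : ∀ (pre : List String), (∀ t ∈ pre, t ≠ "b-1") →
    ∀ (i : Int) (st : Int × Int × PySem.Dict Int (Int × Int)),
      (PySem.List.enumerate pre i).foldl barIdxStep st = st := by
  intro pre
  induction pre with
  | nil => intro _ i st; simp [PySem.List.enumerate_nil]
  | cons t rest ih =>
    intro h i st
    rw [PySem.List.enumerate_cons]
    simp only [List.foldl_cons]
    have ht : t ≠ "b-1" := h t (by simp)
    have hstep : barIdxStep st (i, t) = st := by simp [barIdxStep, ht]
    rw [hstep]
    exact ih (fun x hx => h x (List.mem_cons_of_mem _ hx)) (i + 1) st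

lemma barIdxFold (n : Nat) : ∀ (xs : List String), xs.length ≤ n →
    ∀ (i : Nat) (b : Int) (d : PySem.Dict Int (Int × Int)), (∀ p ∈ d.items, p.1 < b) →
      (((PySem.List.enumerate xs (i : Int)).foldl barIdxStep ((i : Int), b, d)).2.2).items
        = d.items ++ itemsB b i xs := by
  induction n with
  | zero =>
    intro xs hlen i b d _
    have hxs : xs = [] := List.length_eq_zero_iff.mp (Nat.le_zero.mp hlen)
    subst hxs
    simp [PySem.List.enumerate_nil, itemsB_none b i [] (by simp [PySem.List.index?_eq_idxOf?])]
  | succ n ih =>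
    intro xs hlen i b d hfresh
    cases hidx : PySem.List.index? xs "b-1" with
    | none =>
      have hnot : "b-1" ∉ xs := Iff.mp (PySem.List.index?_eq_none_iff xs "b-1") hidx
      rw [barIdx_skip xs (fun t ht he => hnot (he ▸ ht)) _ _]
      rw [itemsB_none _ _ _ hidx]
      simp
    | some k =>
      obtain ⟨pre, suf, hxs, hlenp, hnpre⟩ := Iff.mp (PySem.List.index?_eq_some_iff xs "b-1" k) hidx
      subst hlenp
      subst hxs
      have hc : d.contains b = false := by
        have hbk : b ∉ d.keys := by
          intro hb
          simp only [PySem.Dict.keys, List.mem_map] at hb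
          obtain ⟨p, hp, hpb⟩ := hb
          have := hfresh p hp
          omega
        rw [PySem.Dict.contains_eq_decide_mem_keys]
        simpa using hbk
      have hitems := PySem.Dict.items_insert_of_not_contains
        (d := d) (k := b) (v := ((i : Int), (i : Int) + (pre.length : Int) + 1)) hc
      rw [PySem.List.enumerate_append, List.foldl_append]
      rw [barIdx_skip pre (fun t ht he => hnpre (he ▸ ht)) _ _]
      rw [PySem.List.enumerate_cons]
      simp only [List.foldl_cons]
      have hstep : barIdxStep ((i : Int), b, d) (((i : Int) + pre.length, "b-1"))
          = ((i : Int) + pre.length + 1, b + 1,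
             d.insert b ((i : Int), (i : Int) + pre.length + 1)) := by
        simp [barIdxStep]
      rw [hstep]
      have hcast : (i : Int) + (pre.length : Int) + 1 = ((i + pre.length + 1 : Nat) : Int) := by
        push_cast; ring
      rw [hcast]
      have hlen' : suf.length ≤ n := by
        simp only [List.length_append, List.length_cons] at hlen
        omega
      have hfresh' : ∀ p ∈ (d.insert b ((i : Int), ((i + pre.length + 1 : Nat) : Int))).items,
          p.1 < b + 1 := by
        rw [← hcast, hitems]
        intro p hp
        rcases List.mem_append.mp hp with hp | hp
        · have := hfresh p hp; omega
        · simp at hp; subst hp; simp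
      rw [ih suf hlen' (i + pre.length + 1) (b + 1) _ hfresh']
      rw [← hcast, hitems]
      rw [itemsB_some b i _ pre.length hidx]
      have hdrop : (pre ++ "b-1" :: suf).drop (pre.length + 1) = suf := by
        rw [show pre ++ "b-1" :: suf = (pre ++ ["b-1"]) ++ suf by simp]
        rw [show pre.length + 1 = (pre ++ ["b-1"]).length by simp]
        exact List.drop_left
      rw [hdrop, hcast]
      simp

lemma itemsB_fst_ge (n : Nat) : ∀ (xs : List String), xs.length ≤ n →
    ∀ (b : Int) (i : Nat), ∀ p ∈ itemsB b i xs, b ≤ p.1 := by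
  induction n with
  | zero =>
    intro xs hlen b i p hp
    have hxs : xs = [] := List.length_eq_zero_iff.mp (Nat.le_zero.mp hlen)
    subst hxs
    rw [itemsB_none b i [] (by simp [PySem.List.index?_eq_idxOf?])] at hp
    simp at hp
  | succ n ih =>
    intro xs hlen b i p hp
    cases hidx : PySem.List.index? xs "b-1" with
    | none => rw [itemsB_none _ _ _ hidx] at hp; simp at hp
    | some k =>
      rw [itemsB_some _ _ _ _ hidx] at hp
      rcases List.mem_cons.mp hp with hp | hp
      · subst hp; simp
      · have hmem : "b-1" ∈ xs := by
          have hs := PySem.List.index?_isSome_iff (xs := xs) (v := "b-1")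
          rw [hidx] at hs; simpa using hs
        have hlen' : (xs.drop (k + 1)).length ≤ n := by
          have hpos := List.length_pos_of_mem hmem
          simp only [List.length_drop]; omega
        have := ih (xs.drop (k + 1)) hlen' (b + 1) (i + k + 1) p hp
        omega

lemma itemsB_fst_nodup (n : Nat) : ∀ (xs : List String), xs.length ≤ n →
    ∀ (b : Int) (i : Nat), ((itemsB b i xs).map (·.1)).Nodup := by
  induction n with
  | zero =>
    intro xs hlen b i
    have hxs : xs = [] := List.length_eq_zero_iff.mp (Nat.le_zero.mp hlen)
    subst hxs
    rw [itemsB_none b i [] (by simp [PySem.List.index?_eq_idxOf?])]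
    simp
  | succ n ih =>
    intro xs hlen b i
    cases hidx : PySem.List.index? xs "b-1" with
    | none => rw [itemsB_none _ _ _ hidx]; simp
    | some k =>
      rw [itemsB_some _ _ _ _ hidx]
      have hmem : "b-1" ∈ xs := by
        have hs := PySem.List.index?_isSome_iff (xs := xs) (v := "b-1")
        rw [hidx] at hs; simpa using hs
      have hlen' : (xs.drop (k + 1)).length ≤ n := by
        have hpos := List.length_pos_of_mem hmem
        simp only [List.length_drop]; omega
      simp only [List.map_cons, List.nodup_cons]
      refine ⟨?_, ih _ hlen' (b + 1) (i + k + 1)⟩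
      intro hb
      obtain ⟨p, hp, hpb⟩ := List.mem_map.mp hb
      have := itemsB_fst_ge n _ hlen' (b + 1) (i + k + 1) p hp
      omega

lemma itemsB_map_slice (full : List String) (n : Nat) : ∀ (suf : List String), suf.length ≤ n →
    ∀ (i : Nat) (b : Int), suf = full.drop i →
      (itemsB b i suf).map
          (fun p => split_condition_seq_bar (PySem.List.slice full (some p.2.1) (some p.2.2)))
        = (segsW [] suf).map split_condition_seq_bar := by
  induction n with
  | zero =>
    intro suf hlen i b _
    have hs : suf = [] := List.length_eq_zero_iff.mp (Nat.le_zero.mp hlen)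
    subst hs
    rw [itemsB_none b i [] (by simp [PySem.List.index?_eq_idxOf?]),
        segsW_none [] [] (by simp [PySem.List.index?_eq_idxOf?])]
    simp
  | succ n ih =>
    intro suf hlen i b hsuf
    cases hidx : PySem.List.index? suf "b-1" with
    | none => rw [itemsB_none _ _ _ hidx, segsW_none _ _ hidx]; simp
    | some k =>
      rw [itemsB_some _ _ _ _ hidx, segsW_some _ _ _ hidx]
      simp only [List.map_cons, List.nil_append]
      have hmem : "b-1" ∈ suf := by
        have hs := PySem.List.index?_isSome_iff (xs := suf) (v := "b-1")
        rw [hidx] at hs; simpa using hs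
      have hlen' : (suf.drop (k + 1)).length ≤ n := by
        have hpos := List.length_pos_of_mem hmem
        simp only [List.length_drop]; omega
      have hslice : PySem.List.slice full (some ((i : Nat) : Int)) (some ((i + k + 1 : Nat) : Int))
            = (full.drop i).take ((i + k + 1) - i) := PySem.List.slice_natCast full i (i + k + 1)
      have h2 : (i + k + 1) - i = k + 1 := by omega
      congr 1
      · rw [hslice, h2, ← hsuf]
      · exact ih (suf.drop (k + 1)) hlen' (i + k + 1) (b + 1)
          (by rw [hsuf, List.drop_drop, ← Nat.add_assoc])

lemma A_eq (xs : List String) :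
    split_condition_seq_segment xs = (segsW [] xs).map split_condition_seq_bar := by
  simp only [split_condition_seq_segment, get_bar_idx_from_condition]
  rw [PySem.List.foldl_append_singleton_eq_map]
  have hitems : (get_bar_idx_from_remi xs).items = itemsB 0 0 xs := by
    have h := barIdxFold xs.length xs le_rfl 0 0 PySem.Dict.empty
      (fun p hp => by simp [PySem.Dict.empty] at hp)
    simpa [get_bar_idx_from_remi, PySem.Dict.empty] using h
  have hnd : (get_bar_idx_from_remi xs).keys.Nodup := by
    simp only [PySem.Dict.keys]
    rw [hitems]
    exact itemsB_fst_nodup xs.length xs le_rfl 0 0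
  have hmk : (get_bar_idx_from_remi xs).keys.map
        (fun bar_id => split_condition_seq_bar (PySem.List.slice xs
          (some ((get_bar_idx_from_remi xs).getD bar_id (0, 0)).1)
          (some ((get_bar_idx_from_remi xs).getD bar_id (0, 0)).2)))
      = (get_bar_idx_from_remi xs).items.map
        (fun p => split_condition_seq_bar (PySem.List.slice xs (some p.2.1) (some p.2.2))) := by
    rw [PySem.Dict.items_eq_map_keys _ hnd (0, 0), List.map_map]
    exact List.map_congr_left (fun k _ => by simp)
  rw [List.nil_append, hmk, hitems]
  exact itemsB_map_slice xs xs.length xs le_rfl 0 0 (by simp)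

lemma segsW_shift (t : String) (buf rest : List String) (h : ¬ t = "b-1") :
    segsW buf (t :: rest) = segsW (buf ++ [t]) rest := by
  have hcons := PySem.List.index?_cons_of_ne (xs := rest) (x := t) (v := "b-1") h
  cases hidx : PySem.List.index? rest "b-1" with
  | none =>
    rw [segsW_none _ _ (by rw [hcons, hidx]; rfl), segsW_none _ _ hidx]
  | some k =>
    rw [segsW_some _ _ (k + 1) (by rw [hcons, hidx]; rfl), segsW_some _ _ _ hidx]
    simp

lemma bFold (xs : List String) : ∀ (buf : List String) (acc : List (List (String × List String))),
    (xs.foldl altStep (buf, acc)).2 = acc ++ (segsW buf xs).map split_condition_seq_bar := by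
  induction xs with
  | nil =>
    intro buf acc
    rw [segsW_none _ _ (by simp [PySem.List.index?_eq_idxOf?])]
    simp
  | cons t rest ih =>
    intro buf acc
    simp only [List.foldl_cons]
    by_cases ht : t = "b-1"
    · subst ht
      have hstep : altStep (buf, acc) "b-1"
          = ([], acc ++ [split_condition_seq_bar (buf ++ ["b-1"])]) := by
        cases hidx : List.idxOf? "PITCH" (buf ++ ["b-1"]) <;>
          simp [altStep, split_condition_seq_bar, PySem.List.index?_eq_idxOf?, hidx]
      rw [hstep, ih]
      rw [segsW_some buf ("b-1" :: rest) 0 (by rw [PySem.List.index?_cons_self])]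
      simp
    · have hstep : altStep (buf, acc) t = (buf ++ [t], acc) := by simp [altStep, ht]
      rw [hstep, ih, segsW_shift t buf rest ht]

lemma B_eq (xs : List String) :
    split_condition_seq_segment_alt xs = (segsW [] xs).map split_condition_seq_bar := by
  simpa [split_condition_seq_segment_alt] using bFold xs [] []

-- ===== VERDICT (by name: the statement is the Claim_ definition above) =====
theorem split_condition_seq_segment_spec : Claim_equal_split_condition_seq_segment := by
  intro xs _ _
  unfold Spec_split_condition_seq_segment
  rw [A_eq, B_eq]
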